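-- pv_equiv track=rewrite | github.com/heeringa/aoc | 2021/1/sonar.1.py | count_depth_increases
-- ===== SOURCE A (Python) =====
-- def count_depth_increases(depths):
--     increases = 0
--     last_depth = None
--
--     for depth in depths:
--
--         depth = int(depth)
--
--         if last_depth is None:
--             last_depth = depth
--
--         if depth > last_depth:
--             increases = increases + 1
--
--         last_depth = depth
--
--     return increases
-- ===== SOURCE B (Python) =====
-- def count_depth_increases(depths):
--     ints = [int(x) for x in depths]
--
--     def go(lo, hi):
--         # number of adjacent increases within ints[lo:hi], by divide and conquer
--         if hi - lo < 2:
--             return 0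
--         mid = (lo + hi) // 2
--         return go(lo, mid) + go(mid, hi) + (1 if ints[mid] > ints[mid - 1] else 0)
--
--     return go(0, len(ints))
-- ===== Notes on version B (the rewrite author's own statement) =====
-- stated objective: alternative
-- what changed: Replaces A's single linear pass with a running last_depth accumulator by a divide-and-conquer recursion on index ranges: split the range at its midpoint, count increases in each half independently, and add the one boundary comparison.
import Mathlib
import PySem

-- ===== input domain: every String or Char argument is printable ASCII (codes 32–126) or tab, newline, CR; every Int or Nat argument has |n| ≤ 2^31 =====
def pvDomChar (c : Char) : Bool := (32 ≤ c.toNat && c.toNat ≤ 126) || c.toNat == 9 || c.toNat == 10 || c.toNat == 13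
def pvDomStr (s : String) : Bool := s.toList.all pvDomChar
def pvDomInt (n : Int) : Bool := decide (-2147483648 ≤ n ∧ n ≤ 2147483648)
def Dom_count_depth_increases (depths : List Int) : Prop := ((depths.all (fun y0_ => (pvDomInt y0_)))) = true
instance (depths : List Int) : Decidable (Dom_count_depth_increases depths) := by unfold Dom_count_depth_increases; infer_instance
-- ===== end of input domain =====

-- B replaces A's linear pass with a running last_depth accumulator by a
-- divide-and-conquer recursion on index ranges (alternative); return values
-- proved equal on all inputs.

-- ===== PORT A =====
-- A: fold carrying (increases, last_depth : Option Int); int(depth) is the identity on Int inputs.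
def count_depth_increases (depths : List Int) : Int :=
  (depths.foldl
    (fun (st : Int × Option Int) depth =>
      let last : Int := match st.2 with
        | none => depth
        | some l => l
      let inc : Int := if depth > last then st.1 + 1 else st.1
      (inc, some depth))
    (0, none)).1

-- ===== PORT B =====
-- B's inner go(lo, hi): split at mid, recurse on both halves, add the boundary pair.
-- ints[mid] / ints[mid-1] are always in range when reached (lo+2 ≤ hi ≤ length), so getD is exact there.
def cdiGo (ints : List Int) (lo hi : Nat) : Int :=
  if hi - lo < 2 then 0
  else
    cdiGo ints lo ((lo + hi) / 2) + cdiGo ints ((lo + hi) / 2) hi +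
      (if ints.getD ((lo + hi) / 2) 0 > ints.getD ((lo + hi) / 2 - 1) 0 then 1 else 0)
termination_by hi - lo
decreasing_by all_goals omega

def count_depth_increases_alt (depths : List Int) : Int :=
  cdiGo depths 0 depths.length

-- ===== PRECONDITION & SPEC =====
def Spec_count_depth_increases (depths : List Int) (out : Int) : Prop := out = count_depth_increases_alt depths
instance (depths : List Int) (out : Int) : Decidable (Spec_count_depth_increases depths out) := by unfold Spec_count_depth_increases; infer_instance

-- ===== CLAIM (what is proved, stated in full; the proofs are below) =====
def Claim_equal_count_depth_increases : Prop := ∀ (depths : List Int), Dom_count_depth_increases depths → Spec_count_depth_increases depths (count_depth_increases depths)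

-- ===== LEMMAS AND PROOFS =====

-- shared reference count: number of indices j in [k+1, k+n) with l[j-1] < l[j]
def cdiPred (l : List Int) (j : Nat) : Bool := decide (l.getD (j - 1) 0 < l.getD j 0)

-- A's loop equals the pairwise zip count
theorem cdi_loop (l : List Int) : ∀ (acc last : Int),
    (l.foldl
      (fun (st : Int × Option Int) depth =>
        let lst : Int := match st.2 with
          | none => depth
          | some l => l
        let inc : Int := if depth > lst then st.1 + 1 else st.1
        (inc, some depth))
      (acc, some last)).1
    = acc + ((((last :: l).zip l).countP (fun p => decide (p.1 < p.2)) : Nat) : Int) := by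
  induction l with
  | nil => intro acc last; simp [List.countP]
  | cons d t ih =>
    intro acc last
    simp only [List.foldl_cons, List.zip_cons_cons, List.countP_cons]
    rw [ih]
    by_cases h : last < d <;> simp [h]; ring

-- the pairwise zip count over suffixes equals the index-range count
theorem zip_eq_range (l : List Int) : ∀ k : Nat,
    ((l.drop k).zip (l.drop (k + 1))).countP (fun p => decide (p.1 < p.2))
      = (List.range' (k + 1) (l.length - (k + 1))).countP (cdiPred l) := by
  intro k
  by_cases h : k + 1 < l.length
  · have hk : k < l.length := by omega
    have hn : l.length - (k + 1) = (l.length - (k + 2)) + 1 := by omega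
    rw [hn, List.range'_succ]
    rw [List.drop_eq_getElem_cons hk]
    nth_rewrite 2 [List.drop_eq_getElem_cons h]
    rw [List.zip_cons_cons, List.countP_cons, List.countP_cons]
    rw [zip_eq_range l (k + 1)]
    have h1 : cdiPred l (k + 1) = decide (l[k] < l[k + 1]) := by
      simp [cdiPred, List.getD_eq_getElem?_getD, List.getElem?_eq_getElem hk,
        List.getElem?_eq_getElem h]
    simp [h1]
  · have h1 : l.drop (k + 1) = [] := by
      apply List.drop_eq_nil_of_le; omega
    have h2 : l.length - (k + 1) = 0 := by omega
    simp [h1, h2]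
termination_by k => l.length - k
decreasing_by omega

-- B's divide and conquer equals the index-range count
theorem cdiGo_eq_range (l : List Int) (lo hi : Nat) :
    cdiGo l lo hi = ((List.range' (lo + 1) (hi - (lo + 1))).countP (cdiPred l) : Nat) := by
  rw [cdiGo]
  by_cases h : hi - lo < 2
  · have : hi - (lo + 1) = 0 := by omega
    simp [h, this]
  · simp only [h, if_false]
    rw [cdiGo_eq_range l lo ((lo + hi) / 2), cdiGo_eq_range l ((lo + hi) / 2) hi]
    have hmid1 : lo + 1 ≤ (lo + hi) / 2 := by omega
    have hmid2 : (lo + hi) / 2 + 1 ≤ hi := by omega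
    have hsplit : hi - (lo + 1)
        = ((lo + hi) / 2 - (lo + 1)) + ((hi - ((lo + hi) / 2 + 1)) + 1) := by omega
    rw [hsplit, ← List.range'_append]
    have hstart : lo + 1 + ((lo + hi) / 2 - (lo + 1)) = (lo + hi) / 2 := by omega
    rw [one_mul, hstart, List.range'_succ, List.countP_append, List.countP_cons]
    have hp : cdiPred l ((lo + hi) / 2)
        = decide (l.getD ((lo + hi) / 2 - 1) 0 < l.getD ((lo + hi) / 2) 0) := rfl
    by_cases hb : l.getD ((lo + hi) / 2 - 1) 0 < l.getD ((lo + hi) / 2) 0 <;>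
      simp only [hp, hb, gt_iff_lt, decide_true, decide_false, if_true, if_false] <;> push_cast <;> ring
termination_by hi - lo
decreasing_by all_goals omega

-- ===== VERDICT (by name: the statement is the Claim_ definition above) =====
theorem count_depth_increases_spec : Claim_equal_count_depth_increases := by
  intro depths _
  unfold Spec_count_depth_increases count_depth_increases count_depth_increases_alt
  rw [cdiGo_eq_range, ← zip_eq_range depths 0]
  cases depths with
  | nil => simp [List.countP]
  | cons d t =>
    simp only [List.foldl_cons, lt_irrefl, if_false]
    exact (cdi_loop t 0 d).trans (by simp)
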